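-- pv_equiv track=rewrite | github.com/teddyy279/Python | String/Problem Số chia hết cho 15.py | is_divisible_15
-- ===== SOURCE A (Python) =====
-- def is_divisible_15(s):
--     last_digit = s[-1]
--     if last_digit not in '05':
--         return False
--     sum_digit = 0
--     for i in range(len(s)):
--         sum_digit += int(s[i])
--     return sum_digit % 3 == 0
-- ===== SOURCE B (Python) =====
-- def is_divisible_15(s):
--     if s[-1] in '05':
--         r, p = 0, 1
--         for ch in reversed(s):
--             r = (r + int(ch) * p) % 15
--             p = p * 10 % 15
--         return r == 0
--     return False
-- ===== Notes on version B (the rewrite author's own statement) =====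
-- stated objective: alternative
-- what changed: After the last-digit guard, B computes the number's residue mod 15 by scanning the digits right-to-left with a running power-of-ten residue, instead of A's left-to-right index loop summing digits and testing mod 3.
import Mathlib
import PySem

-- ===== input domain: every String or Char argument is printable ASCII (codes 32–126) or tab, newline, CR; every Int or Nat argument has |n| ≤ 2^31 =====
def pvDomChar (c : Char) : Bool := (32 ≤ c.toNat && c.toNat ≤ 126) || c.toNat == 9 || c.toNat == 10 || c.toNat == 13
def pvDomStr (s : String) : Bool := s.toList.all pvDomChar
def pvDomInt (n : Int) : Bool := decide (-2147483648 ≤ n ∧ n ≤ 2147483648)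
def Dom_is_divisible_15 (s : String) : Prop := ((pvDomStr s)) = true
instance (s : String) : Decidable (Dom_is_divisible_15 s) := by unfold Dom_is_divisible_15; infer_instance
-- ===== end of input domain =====

-- B replaces A's left-to-right digit-sum mod-3 test by a right-to-left scan accumulating the
-- number's residue mod 15 with a running power-of-ten residue (alternative decomposition).

-- int(c) for a single character c; the default 0 is only reached outside Pre_ (Python raises ValueError there)
def pvDigit (c : Char) : Int := (PySem.Int.ofChars? [c]).getD 0

-- ===== PORT A =====
def is_divisible_15 (s : String) : Bool :=
  match PySem.List.pyGet? s.toList (-1) with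
  | none => false            -- IndexError in Python; excluded by Pre_
  | some last_digit =>
    if ¬ (last_digit = '0' ∨ last_digit = '5') then false   -- last_digit not in '05'
    else
      let sum_digit : Int :=
        (PySem.List.pyRange 0 (s.toList.length) 1).foldl
          (fun acc i => acc + pvDigit (PySem.List.pyGetD s.toList i ' ')) 0
      decide (sum_digit % 3 = 0)

-- ===== PORT B =====
-- one loop step of Source B: state (r, p), consuming one character of reversed(s)
def pvStepB (st : Int × Int) (c : Char) : Int × Int :=
  ((st.1 + pvDigit c * st.2) % 15, st.2 * 10 % 15)

def is_divisible_15_alt (s : String) : Bool :=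
  match s.toList.getLast? with   -- s[-1]; none = IndexError, excluded by Pre_
  | some c =>
    if c == '0' || c == '5' then
      (s.toList.reverse.foldl pvStepB (0, 1)).1 == 0
    else false
  | none => false

-- ===== PRECONDITION & SPEC =====
-- Pre_ excludes exactly the inputs where Python A raises: the empty string (IndexError on s[-1])
-- and strings whose last char is '0'/'5' but which contain a non-digit (ValueError from int).
def Pre_is_divisible_15 (s : String) : Prop :=
  s.toList ≠ [] ∧
    ((s.toList.getLast? = some '0' ∨ s.toList.getLast? = some '5') →
      s.toList.all Char.isDigit = true)
instance (s : String) : Decidable (Pre_is_divisible_15 s) := by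
  unfold Pre_is_divisible_15; infer_instance
def pvWitness_is_divisible_15 : String := "45"

def Spec_is_divisible_15 (s : String) (out : Bool) : Prop := out = is_divisible_15_alt s
instance (s : String) (out : Bool) : Decidable (Spec_is_divisible_15 s out) := by
  unfold Spec_is_divisible_15; infer_instance

-- ===== CLAIM (what is proved, stated in full; the proofs are below) =====
def Claim_equal_is_divisible_15 : Prop :=
  ∀ (s : String), Dom_is_divisible_15 s → Pre_is_divisible_15 s →
    Spec_is_divisible_15 s (is_divisible_15 s)

-- ===== LEMMAS AND PROOFS =====

-- value of a digit list read with place values growing to the right (m.head has weight 1)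
def pvRval : List Char → Int
  | [] => 0
  | c :: m => pvDigit c + 10 * pvRval m

-- the B loop's first component is the residue of r + p * pvRval m, mod 15
theorem stepB_fold (m : List Char) (r p a b : Int)
    (hr : r % 15 = a % 15) (hp : p % 15 = b % 15) :
    (m.foldl pvStepB (r, p)).1 % 15 = (a + b * pvRval m) % 15 := by
  induction m generalizing r p a b with
  | nil => simpa [pvRval] using hr
  | cons c t ih =>
    simp only [List.foldl_cons, pvStepB, pvRval]
    have h1 : ((r + pvDigit c * p) % 15) % 15 = (a + pvDigit c * b) % 15 := by
      rw [Int.emod_emod_of_dvd _ (dvd_refl 15), Int.add_emod, Int.mul_emod, hp, hr,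
          ← Int.mul_emod, ← Int.add_emod]
    have h2 : (p * 10 % 15) % 15 = (b * 10) % 15 := by
      rw [Int.emod_emod_of_dvd _ (dvd_refl 15), Int.mul_emod, hp, ← Int.mul_emod]
    have := ih ((r + pvDigit c * p) % 15) (p * 10 % 15) (a + pvDigit c * b) (b * 10) h1 h2
    rw [this]; ring_nf

-- forward Horner value of the digit list
def pvVal (l : List Char) : Int := l.foldl (fun r c => r * 10 + pvDigit c) 0

theorem rval_reverse (l : List Char) : pvRval l.reverse = pvVal l := by
  induction l using List.reverseRecOn with
  | nil => rfl
  | append_singleton t c ih =>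
    simp only [List.reverse_append, List.reverse_cons, List.reverse_nil, List.nil_append,
      List.cons_append, pvRval, pvVal, List.foldl_append, List.foldl_cons, List.foldl_nil]
    rw [show pvRval t.reverse = pvVal t from ih]
    unfold pvVal; ring

-- a digit-sum fold depends on its initial accumulator only through its residue mod 3
theorem foldsum_shift (l : List Char) (x y : Int) (h : x % 3 = y % 3) :
    (l.foldl (fun acc c => acc + pvDigit c) x) % 3
      = (l.foldl (fun acc c => acc + pvDigit c) y) % 3 := by
  induction l generalizing x y with
  | nil => simpa using h
  | cons c t ih => exact ih (x + pvDigit c) (y + pvDigit c) (by omega)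

-- the Horner value and the digit sum agree mod 3
theorem horner_mod3 (l : List Char) (a : Int) :
    (l.foldl (fun r c => r * 10 + pvDigit c) a) % 3
      = (l.foldl (fun acc c => acc + pvDigit c) a) % 3 := by
  induction l generalizing a with
  | nil => rfl
  | cons c t ih =>
    simp only [List.foldl_cons]
    rw [ih (a * 10 + pvDigit c)]
    exact foldsum_shift t _ _ (by omega)

-- the Horner value mod 5 is the last digit mod 5
theorem horner_mod5 (l : List Char) (a : Int) (c : Char) :
    ((l ++ [c]).foldl (fun r c => r * 10 + pvDigit c) a) % 5 = pvDigit c % 5 := by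
  rw [List.foldl_append]
  simp only [List.foldl_cons, List.foldl_nil]
  omega

theorem is_divisible_15_spec_aux (s : String) (hpre : Pre_is_divisible_15 s) :
    is_divisible_15 s = is_divisible_15_alt s := by
  obtain ⟨hne, _⟩ := hpre
  unfold is_divisible_15 is_divisible_15_alt
  rw [PySem.List.pyGet?_neg_one]
  cases hl : s.toList.getLast? with
  | none => rfl
  | some last =>
    simp only
    by_cases h05 : last = '0' ∨ last = '5'
    · have hbeq : (last == '0' || last == '5') = true := by
        rcases h05 with h | h <;> simp [h]
      simp only [h05, not_true_eq_false, if_false, hbeq, if_true]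
      rw [PySem.List.foldl_pyRange_zero_pyGetD' s.toList ' '
            (fun acc c => acc + pvDigit c) 0]
      set v : Int := pvVal s.toList with hv
      -- B's accumulator is v % 15
      have hB : (s.toList.reverse.foldl pvStepB (0, 1)).1 % 15 = v % 15 := by
        have := stepB_fold s.toList.reverse 0 1 0 1 rfl rfl
        rw [this, rval_reverse, hv]; ring_nf
      have hrange : 0 ≤ (s.toList.reverse.foldl pvStepB (0, 1)).1 ∧
          (s.toList.reverse.foldl pvStepB (0, 1)).1 < 15 := by
        have hne' : s.toList.reverse ≠ [] := by simpa using hne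
        cases hm : s.toList.reverse with
        | nil => exact absurd hm hne'
        | cons c t =>
          have : ∀ (m : List Char) (x : Int × Int), 0 ≤ x.1 → x.1 < 15 →
              0 ≤ (m.foldl pvStepB x).1 ∧ (m.foldl pvStepB x).1 < 15 := by
            intro m
            induction m with
            | nil => intro x h1 h2; exact ⟨h1, h2⟩
            | cons d u ih =>
              intro x _ _
              exact ih _ (Int.emod_nonneg _ (by norm_num)) (Int.emod_lt_of_pos _ (by norm_num))
          simp only [List.foldl_cons]
          exact this _ _ (Int.emod_nonneg _ (by norm_num)) (Int.emod_lt_of_pos _ (by norm_num))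
      -- A's side: digit sum mod 3
      have hlast : s.toList.getLast hne = last := by
        rwa [List.getLast?_eq_some_getLast hne, Option.some_inj] at hl
      have hdecomp : s.toList = s.toList.dropLast ++ [last] := by
        conv_lhs => rw [← List.dropLast_concat_getLast hne]
        rw [hlast]
      have h3 : v % 3 = (s.toList.foldl (fun acc c => acc + pvDigit c) 0) % 3 :=
        horner_mod3 s.toList 0
      have h5 : v % 5 = 0 := by
        rw [hv, pvVal, hdecomp, horner_mod5]
        rcases h05 with h | h <;> rw [h] <;> decide
      have hiff : (s.toList.foldl (fun acc c => acc + pvDigit c) 0) % 3 = 0 ↔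
          (s.toList.reverse.foldl pvStepB (0, 1)).1 = 0 := by
        rw [← h3]
        constructor
        · intro h; omega
        · intro h; omega
      rw [Bool.eq_iff_iff]
      simp only [decide_eq_true_eq, beq_iff_eq]
      exact hiff
    · have hbeq : (last == '0' || last == '5') = false := by
        simp only [Bool.or_eq_false_iff, beq_eq_false_iff_ne]
        exact ⟨fun h => h05 (Or.inl h), fun h => h05 (Or.inr h)⟩
      rw [if_pos h05, hbeq]
      exact (if_neg (by decide)).symm

-- ===== VERDICT (by name: the statement is the Claim_ definition above) =====
theorem is_divisible_15_spec : Claim_equal_is_divisible_15 := by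
  intro s _ hpre
  exact is_divisible_15_spec_aux s hpre
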